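-- pv_equiv track=rewrite | github.com/MingyuKim87/MLwM | helper/config_helper.py | set_config_fc_layers
-- ===== SOURCE A (Python) =====
-- def set_config_fc_layers(n_way, embed_size, hidden_size, layer_counts):
--     Layers = []
--
--     if layer_counts == 1:
--         fc_layer = ('fc', [n_way, embed_size])
--         Layers.append(fc_layer)
--
--     else:
--         for i in range(layer_counts):
--             if i == 0:
--                 fc_layer = ('fc', [hidden_size, embed_size])
--             elif i == (layer_counts - 1):
--                 fc_layer = ('fc', [n_way, hidden_size])
--             else:
--                 fc_layer = ('fc', [hidden_size, hidden_size])
--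
--             Layers.append(fc_layer)
--
--     return Layers
-- ===== SOURCE B (Python) =====
-- def set_config_fc_layers(n_way, embed_size, hidden_size, layer_counts):
--     dims = [embed_size] + [hidden_size] * (layer_counts - 1) + [n_way]
--     return [('fc', [dims[i + 1], dims[i]]) for i in range(layer_counts)]
-- ===== Notes on version B (the rewrite author's own statement) =====
-- stated objective: simpler
-- what changed: Replaces the layer_counts==1 special case and the first/last/middle positional branching by precomputing a flat dimensions table [embed]+[hidden]*(k-1)+[n_way] and pairing consecutive entries.
import Mathlib
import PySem

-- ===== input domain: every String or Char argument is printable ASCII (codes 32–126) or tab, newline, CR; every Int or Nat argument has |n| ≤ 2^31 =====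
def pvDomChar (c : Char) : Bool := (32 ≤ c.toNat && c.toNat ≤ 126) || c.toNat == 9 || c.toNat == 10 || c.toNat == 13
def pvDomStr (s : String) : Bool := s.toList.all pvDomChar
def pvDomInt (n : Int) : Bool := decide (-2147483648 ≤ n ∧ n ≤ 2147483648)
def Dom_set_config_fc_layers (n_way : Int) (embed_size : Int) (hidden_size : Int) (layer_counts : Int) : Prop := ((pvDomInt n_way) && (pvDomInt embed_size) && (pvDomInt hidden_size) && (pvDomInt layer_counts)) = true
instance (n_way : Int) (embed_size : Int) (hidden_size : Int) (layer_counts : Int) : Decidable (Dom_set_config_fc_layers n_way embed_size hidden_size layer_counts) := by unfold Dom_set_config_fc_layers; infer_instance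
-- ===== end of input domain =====

-- B replaces A's layer_counts==1 special case and positional branching by a
-- precomputed dimensions table consumed adjacent-pairwise (objective: simpler).


-- ===== PORT A =====
def set_config_fc_layers (n_way : Int) (embed_size : Int) (hidden_size : Int) (layer_counts : Int) : List (String × List Int) :=
  if layer_counts = 1 then
    [("fc", [n_way, embed_size])]
  else
    (PySem.List.pyRange 0 layer_counts 1).foldl
      (fun Layers i =>
        let fc_layer : String × List Int :=
          if i = 0 then ("fc", [hidden_size, embed_size])
          else if i = layer_counts - 1 then ("fc", [n_way, hidden_size])
          else ("fc", [hidden_size, hidden_size])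
        Layers ++ [fc_layer]) []

-- ===== PORT B =====
def set_config_fc_layers_alt (n_way : Int) (embed_size : Int) (hidden_size : Int) (layer_counts : Int) : List (String × List Int) :=
  let dims : List Int := [embed_size] ++ List.replicate (layer_counts - 1).toNat hidden_size ++ [n_way]
  (PySem.List.pyRange 0 layer_counts 1).map
    (fun i => ("fc", [PySem.List.pyGetD dims (i + 1) 0, PySem.List.pyGetD dims i 0]))

-- ===== PRECONDITION & SPEC =====
def Spec_set_config_fc_layers (n_way : Int) (embed_size : Int) (hidden_size : Int) (layer_counts : Int) (out : List (String × List Int)) : Prop := out = set_config_fc_layers_alt n_way embed_size hidden_size layer_counts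
instance (n_way : Int) (embed_size : Int) (hidden_size : Int) (layer_counts : Int) (out : List (String × List Int)) : Decidable (Spec_set_config_fc_layers n_way embed_size hidden_size layer_counts out) := by unfold Spec_set_config_fc_layers; infer_instance

-- ===== CLAIM (what is proved, stated in full; the proofs are below) =====
def Claim_equal_set_config_fc_layers : Prop := ∀ (n_way : Int) (embed_size : Int) (hidden_size : Int) (layer_counts : Int), Dom_set_config_fc_layers n_way embed_size hidden_size layer_counts → Spec_set_config_fc_layers n_way embed_size hidden_size layer_counts (set_config_fc_layers n_way embed_size hidden_size layer_counts)

-- ===== LEMMAS AND PROOFS =====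

-- dims[i] characterised for 0 ≤ i ≤ layer_counts (layer_counts ≥ 1)
theorem pv_dims_get (e h n lc i : Int) (hlc : 1 ≤ lc) (h0 : 0 ≤ i) (hi : i ≤ lc) :
    PySem.List.pyGetD ([e] ++ List.replicate (lc - 1).toNat h ++ [n]) i 0 =
      if i = 0 then e else if i = lc then n else h := by
  rw [PySem.List.pyGetD_of_nonneg _ _ h0]
  rcases eq_or_ne i 0 with rfl | h00
  · simp
  · obtain ⟨k, hk⟩ : ∃ k, i.toNat = k + 1 := ⟨i.toNat - 1, by omega⟩
    rw [hk]
    simp only [List.cons_append, List.nil_append, List.getD_cons_succ]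
    rcases eq_or_ne i lc with hEq | hEnd
    · have hk' : k = (lc - 1).toNat := by omega
      subst hk'
      rw [List.getD_append_right _ _ _ _ (by simp)]
      simp [hEq, show lc ≠ 0 by omega]
    · have hklt : k < (lc - 1).toNat := by omega
      rw [List.getD_append _ _ _ _ (by simpa using hklt)]
      simp [List.getD_eq_getElem?_getD,
            show k < lc.toNat - 1 by omega, h00, hEnd]

theorem set_config_fc_layers_eq (n_way embed_size hidden_size layer_counts : Int) :
    set_config_fc_layers n_way embed_size hidden_size layer_counts =
      set_config_fc_layers_alt n_way embed_size hidden_size layer_counts := by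
  unfold set_config_fc_layers set_config_fc_layers_alt
  rcases lt_trichotomy layer_counts 1 with hlt | heq | hgt
  · -- layer_counts ≤ 0: both empty
    rw [if_neg (by omega), PySem.List.pyRange_one_eq_nil (by omega)]
    simp
  · subst heq
    rw [if_pos rfl, PySem.List.pyRange_one_cons (by norm_num),
        PySem.List.pyRange_one_eq_nil (by norm_num)]
    simp [PySem.List.pyGetD]
  · -- layer_counts ≥ 2
    rw [if_neg (by omega), PySem.List.foldl_append_singleton_eq_map]
    simp only [List.nil_append]
    apply List.map_congr_left
    intro i hi
    rw [PySem.List.mem_pyRange_one] at hi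
    rw [pv_dims_get _ _ _ _ _ (by omega) (by omega) (by omega),
        pv_dims_get _ _ _ _ _ (by omega) (by omega) (by omega)]
    rcases eq_or_ne i 0 with rfl | hi0
    · simp [show (1 : Int) ≠ layer_counts by omega]
    · rcases eq_or_ne i (layer_counts - 1) with rfl | hil
      · simp [hi0, show layer_counts - 1 + 1 = layer_counts by omega,
              show layer_counts ≠ 0 by omega,
              show layer_counts - 1 ≠ layer_counts by omega]
      · simp [hi0, hil, show i + 1 ≠ 0 by omega, show i + 1 ≠ layer_counts by omega,
              show i ≠ layer_counts by omega]

-- ===== VERDICT (by name: the statement is the Claim_ definition above) =====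
theorem set_config_fc_layers_spec : Claim_equal_set_config_fc_layers := by
  intro n_way embed_size hidden_size layer_counts _
  exact set_config_fc_layers_eq n_way embed_size hidden_size layer_counts
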